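-- pv_equiv track=rewrite | github.com/davidtheplatform/threespeed | src/compiler.py | verify_asset_name
-- ===== SOURCE A (Python) =====
-- def verify_asset_name(asset_name):
--     parts = asset_name.split('.')
--     if len(parts) != 2:
--         return False
--     if len(parts[0]) != 32:
--         return False
--     if len(parts[1]) != 3:
--         return False
--
--     for char in parts[0] + parts[1]:
--         if char not in '0123456789abcdefsvgpngjpegwavmp3':
--             return False
--
--     return True
-- ===== SOURCE B (Python) =====
-- def verify_asset_name(asset_name):
--     # single-pass position-indexed state machine: each position prescribes its own
--     # admissible character (dot at 32, allowed alphabet elsewhere below 36), and the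
--     # scan must end exactly in state 36
--     allowed = frozenset('0123456789abcdefsvgpngjpegwavmp3')
--     n = 0
--     for c in asset_name:
--         if n == 32:
--             ok = (c == '.')
--         elif n < 36:
--             ok = c in allowed
--         else:
--             ok = False
--         if not ok:
--             return False
--         n += 1
--     return n == 36
-- ===== Notes on version B (the rewrite author's own statement) =====
-- stated objective: alternative
-- what changed: B replaces A's split-on-dot, three length guards and per-character membership loop by a single-pass position-indexed state machine: one scan with a running counter whose value determines the admissible character at each position (dot exactly at 32, the allowed alphabet elsewhere below 36), accepting iff the scan ends in state 36.
import Mathlib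
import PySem

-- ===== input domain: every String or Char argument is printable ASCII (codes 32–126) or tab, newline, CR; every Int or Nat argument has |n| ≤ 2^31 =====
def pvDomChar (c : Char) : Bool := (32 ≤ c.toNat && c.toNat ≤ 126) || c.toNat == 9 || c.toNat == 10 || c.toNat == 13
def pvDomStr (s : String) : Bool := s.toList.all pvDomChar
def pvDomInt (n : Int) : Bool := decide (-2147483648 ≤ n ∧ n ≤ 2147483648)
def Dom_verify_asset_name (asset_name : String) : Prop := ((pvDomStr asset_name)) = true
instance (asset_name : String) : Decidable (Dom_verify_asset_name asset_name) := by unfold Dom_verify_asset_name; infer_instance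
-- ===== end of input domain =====

-- B replaces A's split + three length guards + character loop by a single-pass
-- position-indexed state machine (the admissible character is a function of the position,
-- acceptance state 36); objective: alternative decomposition, same O(n) cost.

-- ===== PORT A =====
-- the allowed-character string of A, as a char list
def pvAllowedA : List Char := "0123456789abcdefsvgpngjpegwavmp3".toList

-- A's for-loop with its early return: checks each char of the concatenation via
-- Python's substring membership `char in '...'` (PySem.Chars.isIn on a 1-char needle)
def pvCheckCharsA : List Char → Bool
  | [] => true
  | c :: rest => if PySem.Chars.isIn [c] pvAllowedA then pvCheckCharsA rest else false

def verify_asset_name (asset_name : String) : Bool :=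
  -- asset_name.split('.') with a nonempty separator is PySem.Chars.splitOn on the char list
  let parts := PySem.Chars.splitOn asset_name.toList ['.']
  if parts.length ≠ 2 then false
  else if PySem.Chars.len (PySem.List.pyGetD parts 0 []) ≠ 32 then false
  else if PySem.Chars.len (PySem.List.pyGetD parts 1 []) ≠ 3 then false
  else pvCheckCharsA (PySem.List.pyGetD parts 0 [] ++ PySem.List.pyGetD parts 1 [])

-- ===== PORT B =====
-- frozenset('0123456789abcdefsvgpngjpegwavmp3')
def pvAllowedSetB : PySem.Set Char := PySem.Set.ofList "0123456789abcdefsvgpngjpegwavmp3".toList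

-- the per-position admissibility test of B's loop body (n is Python's running counter)
def pvStepB (n : Int) (c : Char) : Bool :=
  if n == 32 then c == '.'
  else if n < 36 then pvAllowedSetB.contains c
  else false

-- B's for-loop: early return False on an inadmissible character, else advance the counter
def pvScanB : List Char → Int → Bool
  | [], n => n == 36
  | c :: rest, n => if pvStepB n c then pvScanB rest (n + 1) else false

def verify_asset_name_alt (asset_name : String) : Bool :=
  pvScanB asset_name.toList 0

-- ===== PRECONDITION & SPEC =====
def Spec_verify_asset_name (asset_name : String) (out : Bool) : Prop := out = verify_asset_name_alt asset_name
instance (asset_name : String) (out : Bool) : Decidable (Spec_verify_asset_name asset_name out) := by unfold Spec_verify_asset_name; infer_instance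

-- ===== CLAIM (what is proved, stated in full; the proofs are below) =====
def Claim_equal_verify_asset_name : Prop := ∀ (asset_name : String), Dom_verify_asset_name asset_name → Spec_verify_asset_name asset_name (verify_asset_name asset_name)

-- ===== LEMMAS AND PROOFS =====

-- the common index characterization both programs are proved equivalent to
def pvGood (l : List Char) : Prop :=
  l.length = 36 ∧ ∀ (j : Nat) (h : j < l.length),
    if j = 32 then l[j] = '.' else l[j] ∈ pvAllowedA

-- pure specification of splitting a char list at every '.'
def pvSplitDot : List Char → List Char × List (List Char)
  | [] => ([], [])
  | c :: rest =>
    let r := pvSplitDot rest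
    if c = '.' then ([], r.1 :: r.2) else (c :: r.1, r.2)

theorem pv_go_eq : ∀ (fuel : Nat) (l cur : List Char) (acc : List (List Char)),
    l.length ≤ fuel →
    PySem.Chars.splitOn.go ['.'] fuel l cur acc
      = acc.reverse ++ (cur.reverse ++ (pvSplitDot l).1) :: (pvSplitDot l).2 := by
  intro fuel
  induction fuel with
  | zero =>
    intro l cur acc h
    have : l = [] := List.eq_nil_of_length_eq_zero (Nat.le_zero.mp h)
    subst this
    simp [PySem.Chars.splitOn.go, pvSplitDot]
  | succ n ih =>
    intro l cur acc h
    cases l with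
    | nil => simp [PySem.Chars.splitOn.go, pvSplitDot]
    | cons c rest =>
      simp only [PySem.Chars.splitOn.go]
      by_cases hc : c = '.'
      · subst hc
        rw [if_pos (by simp [List.isPrefixOf])]
        simp only [List.length_cons, List.length_nil, Nat.zero_add, List.drop_succ_cons,
          List.drop_zero]
        rw [ih rest [] _ (by simpa using Nat.le_of_succ_le_succ h)]
        simp [pvSplitDot]
      · rw [if_neg (by simp [List.isPrefixOf]; exact fun h' => hc (Eq.symm h'))]
        rw [ih rest (c :: cur) acc (by simpa using Nat.le_of_succ_le_succ h)]
        simp [pvSplitDot, hc]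

theorem pv_splitOn_eq (l : List Char) :
    PySem.Chars.splitOn l ['.'] = (pvSplitDot l).1 :: (pvSplitDot l).2 := by
  rw [PySem.Chars.splitOn, pv_go_eq (l.length + 1) l [] [] (by omega)]
  simp

-- structure of pvSplitDot: the input is the pieces rejoined with '.', and no piece contains '.'
theorem pvSplitDot_spec (l : List Char) :
    l = (pvSplitDot l).1 ++ (((pvSplitDot l).2.map (fun q => '.' :: q)).flatten)
    ∧ '.' ∉ (pvSplitDot l).1 ∧ ∀ q ∈ (pvSplitDot l).2, '.' ∉ q := by
  induction l with
  | nil => simp [pvSplitDot]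
  | cons c rest ih =>
    by_cases hc : c = '.'
    · subst hc
      simp only [pvSplitDot]
      refine ⟨?_, by simp, ?_⟩
      · simpa using ih.1
      · intro q hq
        rcases List.mem_cons.mp hq with h | h
        · subst h; exact ih.2.1
        · exact ih.2.2 q h
    · simp only [pvSplitDot, if_neg hc]
      refine ⟨by simpa using ih.1, ?_, ih.2.2⟩
      simp only [List.mem_cons, not_or]
      exact ⟨fun h => hc h.symm, ih.2.1⟩

theorem pvSplitDot_no_dot (p : List Char) (hp : '.' ∉ p) : pvSplitDot p = (p, []) := by
  induction p with
  | nil => simp [pvSplitDot]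
  | cons c rest ih =>
    simp only [List.mem_cons, not_or] at hp
    have hcne : ¬ c = '.' := fun h => hp.1 (Eq.symm h)
    simp [pvSplitDot, hcne, ih hp.2]

theorem pvSplitDot_append_dot (p rest : List Char) (hp : '.' ∉ p) :
    pvSplitDot (p ++ '.' :: rest) = (p, (pvSplitDot rest).1 :: (pvSplitDot rest).2) := by
  induction p with
  | nil => simp [pvSplitDot]
  | cons c t ih =>
    simp only [List.mem_cons, not_or] at hp
    have hcne : ¬ c = '.' := fun h => hp.1 (Eq.symm h)
    simp [pvSplitDot, hcne, ih hp.2]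

theorem pvCheck_eq_all (l : List Char) :
    pvCheckCharsA l = l.all (fun c => decide (c ∈ pvAllowedA)) := by
  induction l with
  | nil => rfl
  | cons c rest ih =>
    have hiff : PySem.Chars.isIn [c] pvAllowedA = true ↔ c ∈ pvAllowedA := by
      rw [PySem.Chars.isIn_iff_infix]
      exact List.singleton_infix_iff c pvAllowedA
    simp only [pvCheckCharsA, List.all_cons]
    by_cases h : c ∈ pvAllowedA
    · rw [if_pos (hiff.mpr h), ih]; simp [h]
    · rw [if_neg (fun hh => h (hiff.mp hh))]; simp [h]

theorem pv_dot_not_allowed : '.' ∉ pvAllowedA := by decide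

theorem pv_contains_iff (c : Char) : pvAllowedSetB.contains c = true ↔ c ∈ pvAllowedA := by
  rw [PySem.Set.contains_iff]
  exact PySem.Set.mem_ofList _ c

-- a list decomposed as 32 allowed chars, '.', 3 allowed chars is pvGood …
theorem pv_good_of_parts (p q : List Char) (hp32 : p.length = 32) (hq3 : q.length = 3)
    (hmem : ∀ c ∈ p ++ q, c ∈ pvAllowedA) : pvGood (p ++ '.' :: q) := by
  have hlen : (p ++ '.' :: q).length = 36 := by simp [hp32, hq3]
  refine ⟨hlen, ?_⟩
  intro j hj
  rw [hlen] at hj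
  by_cases hjlt : j < 32
  · rw [if_neg (by omega)]
    have hjp : j < p.length := by omega
    rw [List.getElem_append_left hjp]
    exact hmem _ (List.mem_append_left _ (List.getElem_mem _))
  · by_cases hj32 : j = 32
    · subst hj32
      rw [if_pos rfl]
      have hge : p.length ≤ 32 := by omega
      rw [List.getElem_append_right hge]
      simp [hp32]
    · rw [if_neg hj32]
      have hge : p.length ≤ j := by omega
      rw [List.getElem_append_right hge]
      have hix : j - p.length = (j - 33) + 1 := by omega
      simp only [hix, List.getElem_cons_succ]
      exact hmem _ (List.mem_append_right _ (List.getElem_mem _))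

-- … and every pvGood list decomposes that way
theorem pv_parts_of_good (l : List Char) (h : pvGood l) :
    ∃ p q, l = p ++ '.' :: q ∧ p.length = 32 ∧ q.length = 3 ∧ ∀ c ∈ p ++ q, c ∈ pvAllowedA := by
  obtain ⟨hlen, hall⟩ := h
  refine ⟨l.take 32, l.drop 33, ?_, ?_, ?_, ?_⟩
  · have h32 : l[32]'(by omega) = '.' := by simpa using hall 32 (by omega)
    calc l = l.take 32 ++ l.drop 32 := (List.take_append_drop 32 l).symm
      _ = l.take 32 ++ l[32]'(by omega) :: l.drop 33 := by
            rw [List.drop_eq_getElem_cons (by omega)]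
      _ = _ := by rw [h32]
  · simp [hlen]
  · simp [hlen]
  · intro c hc
    rcases List.mem_append.mp hc with hc | hc
    · obtain ⟨i, hi, rfl⟩ := List.mem_iff_getElem.mp hc
      rw [List.getElem_take]
      have hi' : i < 32 := by simp [hlen] at hi; omega
      have := hall i (by omega)
      rwa [if_neg (by omega)] at this
    · obtain ⟨i, hi, rfl⟩ := List.mem_iff_getElem.mp hc
      rw [List.getElem_drop]
      have hi' : i < 3 := by simp [hlen] at hi; omega
      have := hall (33 + i) (by omega)
      rwa [if_neg (by omega)] at this

-- A accepts exactly the pvGood lists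
theorem pv_A_iff (s : String) : verify_asset_name s = true ↔ pvGood s.toList := by
  set l := s.toList with hl
  constructor
  · intro h
    unfold verify_asset_name at h
    rw [pv_splitOn_eq] at h
    simp only [ne_eq] at h
    split_ifs at h with h1 h2 h3
    obtain ⟨q, hq⟩ := List.length_eq_one_iff.mp (by simpa using h1)
    rw [hq] at h h2 h3
    obtain ⟨hdec, hp, hqd⟩ := pvSplitDot_spec l
    rw [hq] at hdec hqd
    simp only [List.map_cons, List.map_nil, List.flatten_cons, List.flatten_nil,
      List.append_nil] at hdec
    set p := (pvSplitDot l).1 with hpdef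
    have hg0 : PySem.List.pyGetD [p, q] (0 : Int) [] = p := rfl
    have hg1 : PySem.List.pyGetD [p, q] (1 : Int) [] = q := rfl
    rw [hg0, hg1] at h
    rw [hg0] at h2
    rw [hg1] at h3
    simp only [PySem.Chars.len_eq] at h2 h3
    have hp32 : p.length = 32 := by exact_mod_cast h2
    have hq3 : q.length = 3 := by exact_mod_cast h3
    rw [pvCheck_eq_all] at h
    simp only [List.all_eq_true, decide_eq_true_eq] at h
    rw [hdec]
    exact pv_good_of_parts p q hp32 hq3 h
  · intro h
    obtain ⟨p, q, hdec, hp32, hq3, hmem⟩ := pv_parts_of_good l h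
    have hpd : '.' ∉ p := fun hd => pv_dot_not_allowed (hmem '.' (List.mem_append_left _ hd))
    have hqd : '.' ∉ q := fun hd => pv_dot_not_allowed (hmem '.' (List.mem_append_right _ hd))
    have hsplit : pvSplitDot l = (p, [q]) := by
      rw [hdec, pvSplitDot_append_dot p q hpd, pvSplitDot_no_dot q hqd]
    unfold verify_asset_name
    rw [pv_splitOn_eq, hsplit]
    simp only [PySem.List.pyGetD, PySem.Chars.len_eq]
    rw [if_neg (by simp), if_neg (by simp [hp32]), if_neg (by simp [hq3])]
    rw [pvCheck_eq_all]
    simp only [List.all_eq_true, decide_eq_true_eq]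
    intro c hc
    exact hmem c (by simpa using hc)

-- B's loop-body test, read as a proposition about the Nat counter
theorem pvStep_iff (n : Nat) (c : Char) :
    pvStepB (n : Int) c = true ↔ (if n = 32 then c = '.' else n < 36 ∧ c ∈ pvAllowedA) := by
  unfold pvStepB
  by_cases h32 : n = 32
  · subst h32; simp
  · rw [if_neg (by simpa using fun h => h32 (by exact_mod_cast h))]
    by_cases h36 : n < 36
    · rw [if_pos (by exact_mod_cast h36)]
      rw [pv_contains_iff, if_neg h32]
      simp [h36]
    · rw [if_neg (by exact_mod_cast h36)]
      simp [h32, h36]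

-- B's scan, generalized over the counter
theorem pv_scan_iff (l : List Char) : ∀ (n : Nat),
    pvScanB l (n : Int) = true ↔
      (n + l.length = 36 ∧ ∀ (j : Nat) (h : j < l.length),
        if n + j = 32 then l[j] = '.' else l[j] ∈ pvAllowedA) := by
  induction l with
  | nil =>
    intro n
    simp only [pvScanB, List.length_nil, Nat.add_zero, beq_iff_eq]
    constructor
    · intro h; exact ⟨by exact_mod_cast h, by intro j h; omega⟩
    · intro h; exact_mod_cast h.1
  | cons c rest ih =>
    intro n
    simp only [pvScanB]
    by_cases hs : pvStepB (n : Int) c = true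
    · rw [if_pos hs]
      rw [show (n : Int) + 1 = ((n + 1 : Nat) : Int) by push_cast; ring, ih (n + 1)]
      rw [pvStep_iff] at hs
      constructor
      · rintro ⟨hlen, hall⟩
        refine ⟨by simp; omega, ?_⟩
        intro j hj
        cases j with
        | zero =>
          simp only [List.getElem_cons_zero, Nat.add_zero]
          by_cases h32 : n = 32
          · rw [if_pos h32]; rw [if_pos h32] at hs; exact hs
          · rw [if_neg h32]; rw [if_neg h32] at hs; exact hs.2
        | succ j' =>
          have hj' : j' < rest.length := by simpa using hj
          have := hall j' hj'
          simpa [show n + (j' + 1) = n + 1 + j' by omega] using this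
      · rintro ⟨hlen, hall⟩
        refine ⟨by simp at hlen; omega, ?_⟩
        intro j hj
        have := hall (j + 1) (by simpa using Nat.succ_lt_succ hj)
        simpa [show n + (j + 1) = n + 1 + j by omega] using this
    · rw [if_neg hs]
      rw [pvStep_iff] at hs
      simp only [Bool.false_eq_true, false_iff, not_and]
      intro hlen hall
      have h0 := hall 0 (by simp)
      simp only [List.getElem_cons_zero, Nat.add_zero] at h0
      by_cases h32 : n = 32
      · rw [if_pos h32] at h0 hs; exact hs h0
      · rw [if_neg h32] at h0 hs
        exact hs ⟨by simp at hlen; omega, h0⟩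

theorem pv_B_iff (s : String) : verify_asset_name_alt s = true ↔ pvGood s.toList := by
  unfold verify_asset_name_alt pvGood
  rw [show (0 : Int) = ((0 : Nat) : Int) from rfl, pv_scan_iff]
  simp

theorem pv_main (s : String) : verify_asset_name s = verify_asset_name_alt s := by
  rw [Bool.eq_iff_iff, pv_A_iff, pv_B_iff]

-- ===== VERDICT (by name: the statement is the Claim_ definition above) =====
theorem verify_asset_name_spec : Claim_equal_verify_asset_name := by
  intro s _
  unfold Spec_verify_asset_name
  exact pv_main s
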